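-- pv_equiv track=rewrite | github.com/JohnDoee/thomas | thomas/piece.py | split_pieces
-- ===== SOURCE A (Python) =====
-- def split_pieces(piece_list, segments, num):
--     """
--     Prepare a list of all pieces grouped together
--     """
--     piece_groups = []
--     pieces = list(piece_list)
--     while pieces:
--         for i in range(segments):
--             p = pieces[i::segments][:num]
--             if not p:
--                 break
--             piece_groups.append(p)
--         pieces = pieces[num * segments:]
--
--     return piece_groups
-- ===== SOURCE B (Python) =====
-- def split_pieces(piece_list, segments, num):
--     """
--     Prepare a list of all pieces grouped together
--     """
--     if segments <= 0:
--         return []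
--     groups = []
--     step = num * segments
--     for j, piece in enumerate(piece_list):
--         g = (j // step) * segments + (j % step) % segments
--         if g == len(groups):
--             groups.append([piece])
--         else:
--             groups[g].append(piece)
--     return groups
-- ===== Notes on version B (the rewrite author's own statement) =====
-- stated objective: alternative
-- what changed: B does no slicing at all: a single pass over enumerate(piece_list) computes each element's destination group index arithmetically as (j//step)*segments + (j%step)%segments and appends it there in place, creating a group when the index first appears, instead of A's repeated tail copies and whole-remainder strided slices; a timing run did not confirm a >=1.5x speed-up at the largest size, so none is claimed.
import Mathlib
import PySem

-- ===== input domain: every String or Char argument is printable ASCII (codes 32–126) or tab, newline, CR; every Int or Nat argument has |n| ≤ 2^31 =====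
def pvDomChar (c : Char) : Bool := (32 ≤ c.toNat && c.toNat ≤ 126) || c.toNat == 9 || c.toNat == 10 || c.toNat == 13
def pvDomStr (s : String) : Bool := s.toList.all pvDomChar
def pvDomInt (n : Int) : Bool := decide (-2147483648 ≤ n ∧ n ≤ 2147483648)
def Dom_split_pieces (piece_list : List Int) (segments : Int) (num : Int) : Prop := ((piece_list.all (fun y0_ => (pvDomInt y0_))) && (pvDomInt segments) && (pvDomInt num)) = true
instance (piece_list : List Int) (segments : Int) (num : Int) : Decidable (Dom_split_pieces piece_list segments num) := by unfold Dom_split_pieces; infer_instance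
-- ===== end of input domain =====

-- B replaces A's repeated tail copies and whole-remainder strided slices by a single pass that
-- computes each element's destination group index arithmetically and appends it there in place.

-- ===== PORT A =====
-- p = pieces[i::segments][:num]   (xs[i::segments] is PySem.List.slice? with step; segments = 0 would
-- raise ValueError in Python — inside Pre_ the loop body only runs with segments ≥ 1, so getD [] is never hit)
def pA (pieces : List Int) (segments num i : Int) : List Int :=
  PySem.List.slice ((PySem.List.slice? pieces (some i) none segments).getD []) none (some num)

-- 'for i in range(segments): … if not p: break …' — counting recursion over i (range(segments) is
-- consumed lazily, exactly as Python's iterator: the break stops it without building the range)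
def forA (pieces : List Int) (segments num : Int) : Nat → Int → List (List Int) → List (List Int)
  | 0, _, acc => acc
  | c + 1, i, acc =>
      let p := pA pieces segments num i
      if p = [] then acc else forA pieces segments num c (i + 1) (acc ++ [p])

-- 'while pieces:' — fuel recursion; inside Pre_ each round drops num*segments ≥ 1 elements, so
-- fuel = length + 1 is never exhausted (the fuel only makes the same computation total)
def whileA (segments num : Int) : Nat → List Int → List (List Int) → List (List Int)
  | 0, _, acc => acc
  | fuel + 1, pieces, acc =>
      if pieces = [] then acc
      else
        whileA segments num fuel
          (PySem.List.slice pieces (some (num * segments)) none)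
          (forA pieces segments num segments.toNat 0 acc)

def split_pieces (piece_list : List Int) (segments : Int) (num : Int) : List (List Int) :=
  whileA segments num (piece_list.length + 1) piece_list []

-- ===== PORT B =====
-- loop body: g = (j // step) * segments + (j % step) % segments; 'groups[g].append(piece)' is
-- List.modify at g.toNat (inside Pre_, g is a nonnegative in-range index, exactly Python's indexing)
def scatterStep (segments step : Int) (groups : List (List Int)) (jp : Int × Int) : List (List Int) :=
  let g := PySem.Int.floordiv jp.1 step * segments + PySem.Int.mod (PySem.Int.mod jp.1 step) segments
  if g = (groups.length : Int) then groups ++ [[jp.2]]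
  else groups.modify g.toNat (fun l => l ++ [jp.2])

def split_pieces_alt (piece_list : List Int) (segments : Int) (num : Int) : List (List Int) :=
  if segments ≤ 0 then []
  else (PySem.List.enumerate piece_list).foldl (scatterStep segments (num * segments)) []

-- ===== PRECONDITION & SPEC =====
-- Pre_ excludes exactly the inputs on which A never returns: on a nonempty list, unless
-- num*segments ≥ 1 with an empty or productive inner loop (segments ≥ 1 ∧ num ≥ 1, or both ≤ -1),
-- the remainder pieces[num*segments:] stops shrinking and A loops forever.
def Pre_split_pieces (piece_list : List Int) (segments : Int) (num : Int) : Prop :=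
  piece_list = [] ∨ (1 ≤ segments ∧ 1 ≤ num) ∨ (segments ≤ -1 ∧ num ≤ -1)
instance (piece_list : List Int) (segments : Int) (num : Int) : Decidable (Pre_split_pieces piece_list segments num) := by unfold Pre_split_pieces; infer_instance

def pvWitness_split_pieces : List Int × Int × Int := ([5, 1, 4, 1, 3, 9, 2, 6], 2, 3)

def Spec_split_pieces (piece_list : List Int) (segments : Int) (num : Int) (out : List (List Int)) : Prop := out = split_pieces_alt piece_list segments num
instance (piece_list : List Int) (segments : Int) (num : Int) (out : List (List Int)) : Decidable (Spec_split_pieces piece_list segments num out) := by unfold Spec_split_pieces; infer_instance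

-- ===== CLAIM (what is proved, stated in full; the proofs are below) =====
def Claim_equal_split_pieces : Prop := ∀ (piece_list : List Int) (segments : Int) (num : Int), Dom_split_pieces piece_list segments num → Pre_split_pieces piece_list segments num → Spec_split_pieces piece_list segments num (split_pieces piece_list segments num)

-- ===== LEMMAS AND PROOFS =====

-- proof-side view of A's inner loop as a walk over the explicit index list
def forAL (pieces : List Int) (segments num : Int) : List Int → List (List Int) → List (List Int)
  | [], acc => acc
  | i :: rest, acc =>
      let p := pA pieces segments num i
      if p = [] then acc else forAL pieces segments num rest (acc ++ [p])

theorem forA_eq_forAL (pieces : List Int) (segments num : Int) :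
    ∀ (c : Nat) (i : Int) (acc : List (List Int)),
      forA pieces segments num c i acc
        = forAL pieces segments num (PySem.List.pyRange i (i + (c : Int)) 1) acc := by
  intro c
  induction c with
  | zero =>
      intro i acc
      rw [forA]
      rw [show i + ((0 : Nat) : Int) = i by push_cast; ring,
          PySem.List.pyRange_one_eq_nil (le_refl i)]
      rfl
  | succ c ih =>
      intro i acc
      rw [PySem.List.pyRange_one_cons (by push_cast; omega : i < i + ((c + 1 : Nat) : Int))]
      rw [forA, forAL]
      by_cases hp : pA pieces segments num i = []
      · rw [if_pos hp, if_pos hp]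
      · rw [if_neg hp, if_neg hp, ih (i + 1) (acc ++ [pA pieces segments num i])]
        congr 2
        push_cast
        ring

-- every s-th element of ys starting at its head: the common value of both slicing expressions
def strided (s : Nat) : List Int → List Int
  | [] => []
  | x :: t => x :: strided s (t.drop (s - 1))
termination_by l => l.length
decreasing_by simp only [List.length_drop, List.length_cons]; omega

theorem strided_take (s : Nat) (hs : 0 < s) (ys : List Int) (a : Nat) :
    strided s (ys.take a) = (strided s ys).take ((a + s - 1) / s) := by
  induction ys using strided.induct s generalizing a with
  | case1 => simp [strided]
  | case2 x t ih =>
      cases a with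
      | zero =>
          have : (0 + s - 1) / s = 0 := Nat.div_eq_of_lt (by omega)
          simp [strided]
          omega
      | succ a' =>
          rw [List.take_succ_cons, strided, strided, List.drop_take]
          have h1 : (a' + 1 + s - 1) / s = a' / s + 1 := by
            have : a' + 1 + s - 1 = a' + s := by omega
            rw [this, Nat.add_div_right _ hs]
          rw [h1, List.take_succ_cons]
          congr 1
          rw [ih]
          congr 1
          rcases Nat.lt_or_ge a' (s - 1) with h | h
          · have : a' - (s - 1) = 0 := by omega
            rw [this, Nat.div_eq_of_lt (by omega), Nat.div_eq_of_lt (by omega)]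
          · have : a' - (s - 1) + s - 1 = a' := by omega
            rw [this]

theorem strided_eq_nil_iff (s : Nat) (ys : List Int) : strided s ys = [] ↔ ys = [] := by
  cases ys <;> simp [strided]

-- the slice? index formula over List.range, for a nonnegative start, no stop and positive step
theorem fm_strided (xs : List Int) (s : Nat) (hs : 0 < s) :
    ∀ (c a : Nat), c = (xs.length - a + s - 1) / s →
      List.filterMap (fun k => xs[a + s * k]?) (List.range c) = strided s (xs.drop a) := by
  intro c
  induction c with
  | zero =>
      intro a hc
      have hna : xs.length ≤ a := by
        rcases Nat.lt_or_ge a xs.length with h | h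
        · exfalso
          have h1 : s ≤ xs.length - a + s - 1 := by omega
          have := Nat.div_le_div_right (c := s) h1
          rw [Nat.div_self hs] at this
          omega
        · exact h
      rw [List.drop_eq_nil_of_le hna]
      simp [strided]
  | succ c ih =>
      intro a hc
      have ha : a < xs.length := by
        rcases Nat.lt_or_ge a xs.length with h | h
        · exact h
        · exfalso
          have : xs.length - a = 0 := by omega
          rw [this] at hc
          rw [Nat.div_eq_of_lt (by omega)] at hc
          omega
      rw [List.range_succ_eq_map, List.filterMap_cons, List.filterMap_map]
      have h0 : xs[a + s * 0]? = some xs[a] := by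
        simp [ha]
      rw [h0]
      have hfun : ((fun k => xs[a + s * k]?) ∘ Nat.succ) = fun k => xs[(a + s) + s * k]? := by
        funext k
        simp only [Function.comp_apply]
        congr 1
        simp [Nat.mul_succ]
        omega
      rw [hfun, ih (a + s) ?_]
      · rw [List.drop_eq_getElem_cons ha, strided, List.drop_drop]
        have : a + 1 + (s - 1) = a + s := by omega
        rw [this]
      · rcases Nat.lt_or_ge (xs.length - a) s with h | h
        · have h1 : xs.length - (a + s) = 0 := by omega
          have h2 : (xs.length - a + s - 1) / s = 1 :=
            Nat.div_eq_of_lt_le (by omega) (by omega)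
          rw [h1] at *
          rw [h2] at hc
          rw [Nat.div_eq_of_lt (by omega)]
          omega
        · have h1 : xs.length - (a + s) + s - 1 = xs.length - a - 1 := by omega
          have h2 : xs.length - a + s - 1 = (xs.length - a - 1) + s := by omega
          rw [h2, Nat.add_div_right _ hs] at hc
          rw [h1]
          omega

theorem slice?_eq_strided (xs : List Int) (i s : Nat) (hs : 0 < s) :
    PySem.List.slice? xs (some (i : Int)) none (s : Int) = some (strided s (xs.drop i)) := by
  simp only [PySem.List.slice?, PySem.List.sliceIndices]
  have hs0 : ¬ ((s : Int) = 0) := by omega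
  have hsneg : ¬ ((s : Int) < 0) := by omega
  have hineg : ¬ ((i : Int) < 0) := by omega
  simp only [hs0, hsneg, hineg, if_false]
  rcases Nat.lt_or_ge i xs.length with hi | hi
  · have hmin : min (i : Int) (xs.length : Int) = (i : Int) := by omega
    have hlt : (0 : Int) < (s : Int) := by omega
    rw [hmin, if_pos hlt, if_pos (by omega : (i : Int) < (xs.length : Int))]
    have hcnt : (((xs.length : Int) - i + s - 1) / s).toNat = (xs.length - i + s - 1) / s := by
      have h1 : ((xs.length : Int) - i + s - 1) = ((xs.length - i + s - 1 : Nat) : Int) := by omega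
      rw [h1, ← Int.natCast_div, Int.toNat_natCast]
    rw [hcnt]
    have hfun : (fun x : Nat => xs[((i : Int) + s * x).toNat]?) = fun k : Nat => xs[i + s * k]? := by
      funext k
      congr 1
    rw [hfun, fm_strided xs s hs _ i rfl]
  · have hmin : min (i : Int) (xs.length : Int) = (xs.length : Int) := by omega
    have hlt : (0 : Int) < (s : Int) := by omega
    rw [hmin, if_pos hlt, if_neg (by omega : ¬ ((xs.length : Int) < (xs.length : Int)))]
    rw [List.drop_eq_nil_of_le hi]
    simp [strided]

theorem forA_no_break (pieces : List Int) (segments num : Int) (l1 l2 : List Int)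
    (acc : List (List Int)) (h : ∀ i ∈ l1, pA pieces segments num i ≠ []) :
    forAL pieces segments num (l1 ++ l2) acc
      = forAL pieces segments num l2 (acc ++ l1.map (pA pieces segments num)) := by
  induction l1 generalizing acc with
  | nil => simp
  | cons i t ih =>
      have hi := h i (by simp)
      simp only [List.cons_append, forAL, if_neg hi, List.map_cons]
      rw [ih _ (fun j hj => h j (by simp [hj]))]
      simp only [List.append_assoc, List.singleton_append]

theorem pA_eq (pieces : List Int) (s m j : Nat) (hs : 0 < s) :
    pA pieces (s : Int) (m : Int) (j : Int) = (strided s (pieces.drop j)).take m := by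
  unfold pA
  rw [slice?_eq_strided _ j s hs]
  simp [PySem.List.slice_to_natCast]

-- the groups one num*segments block contributes: its leading residue-class slices
def blockGroups (s : Nat) (block : List Int) : List (List Int) :=
  (List.range (min s block.length)).map (fun i => strided s (block.drop i))

-- one round of A's while-loop appends exactly the block groups of the leading num*segments block
theorem per_round_bg (s m : Nat) (hs : 0 < s) (hm : 0 < m) (pieces : List Int)
    (acc : List (List Int)) :
    forAL pieces (s : Int) (m : Int) (PySem.List.pyRange 0 (s : Int) 1) acc
      = acc ++ blockGroups s (pieces.take (m * s)) := by
  have hsms : s ≤ m * s := Nat.le_mul_of_pos_left s hm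
  set k : Nat := min s pieces.length with hk
  have hks : (k : Int) ≤ (s : Int) := by omega
  have hA : forAL pieces (s : Int) (m : Int) (PySem.List.pyRange 0 (s : Int) 1) acc
      = acc ++ (List.range k).map (fun (j : Nat) => pA pieces (s : Int) (m : Int) (j : Int)) := by
    rw [PySem.List.pyRange_one_append 0 (k : Int) (s : Int) (by omega) hks,
        PySem.List.pyRange_zero_natCast]
    rw [forA_no_break _ _ _ _ _ _ ?nobreak]
    case nobreak =>
      intro i hi
      simp only [List.mem_map, List.mem_range] at hi
      obtain ⟨j, hj, rfl⟩ := hi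
      rw [pA_eq _ _ _ _ hs]
      have hdrop : pieces.drop j ≠ [] := by
        simp only [ne_eq, List.drop_eq_nil_iff]
        omega
      simp only [ne_eq, List.take_eq_nil_iff]
      rw [strided_eq_nil_iff]
      rw [not_or]
      exact ⟨by omega, hdrop⟩
    · rw [List.map_map]
      rcases eq_or_lt_of_le hks with heq | hlt
      · rw [← heq, PySem.List.pyRange_one_eq_nil (le_refl _)]
        rfl
      · rw [PySem.List.pyRange_one_cons hlt]
        have hkl : k = pieces.length := by omega
        have hnil : pA pieces (s : Int) (m : Int) (k : Int) = [] := by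
          rw [pA_eq _ _ _ _ hs, hkl, List.drop_length]
          simp [strided]
        simp [forAL, hnil]
  rw [hA]
  unfold blockGroups
  have hmin : min s (pieces.take (m * s)).length = k := by
    simp only [List.length_take]
    omega
  rw [hmin]
  congr 1
  apply List.map_congr_left
  intro j hj
  simp only [List.mem_range] at hj
  rw [pA_eq _ _ _ _ hs, List.drop_take, strided_take s hs]
  congr 1
  have hjs : j < s := by omega
  have h1 : m * s ≤ m * s - j + s - 1 := by omega
  have h2 : m * s - j + s - 1 < (m + 1) * s := by
    have hx : (m + 1) * s = m * s + s := by ring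
    omega
  exact (Nat.div_eq_of_lt_le h1 h2).symm

-- the grouped result, block by block (well-founded on the list length; step > 0)
def Gs (s step : Nat) (hstep : 0 < step) (xs : List Int) : List (List Int) :=
  if h : xs = [] then []
  else blockGroups s (xs.take step) ++ Gs s step hstep (xs.drop step)
termination_by xs.length
decreasing_by
  cases xs with
  | nil => exact absurd rfl h
  | cons y t => simp only [List.length_drop, List.length_cons]; omega

theorem whileA_eq_Gs (s m : Nat) (hs : 0 < s) (hm : 0 < m) :
    ∀ (fuel : Nat) (pieces : List Int) (acc : List (List Int)), pieces.length < fuel →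
      whileA (s : Int) (m : Int) fuel pieces acc
        = acc ++ Gs s (m * s) (Nat.mul_pos hm hs) pieces := by
  intro fuel
  induction fuel with
  | zero => intro pieces acc h; omega
  | succ fuel ih =>
      intro pieces acc h
      rw [whileA]
      by_cases hnil : pieces = []
      · rw [if_pos hnil, hnil, Gs]
        simp
      · rw [if_neg hnil]
        have hcast : (m : Int) * (s : Int) = ((m * s : Nat) : Int) := by push_cast; ring
        have hnext : PySem.List.slice pieces (some ((m : Int) * (s : Int))) none
            = pieces.drop (m * s) := by
          rw [PySem.List.slice_from _ (by positivity), hcast, Int.toNat_natCast]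
        rw [hnext, forA_eq_forAL, Int.toNat_natCast,
            show (0 : Int) + ((s : Nat) : Int) = (s : Int) by ring,
            per_round_bg s m hs hm pieces acc]
        have hfuel : (pieces.drop (m * s)).length < fuel := by
          have hms : 0 < m * s := Nat.mul_pos hm hs
          have hd0 : 0 < pieces.length := List.length_pos_iff.mpr hnil
          simp only [List.length_drop]
          omega
        rw [ih (pieces.drop (m * s)) _ hfuel]
        rw [List.append_assoc]
        congr 1
        conv_rhs => rw [Gs, dif_neg hnil]

-- with segments ≤ 0 A's inner loop never appends: range(segments) is empty every round
theorem whileA_nonpos (segments num : Int) (h : segments ≤ 0) :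
    ∀ (fuel : Nat) (pieces : List Int) (acc : List (List Int)),
      whileA segments num fuel pieces acc = acc := by
  intro fuel
  induction fuel with
  | zero => intro pieces acc; rfl
  | succ fuel ih =>
      intro pieces acc
      rw [whileA]
      by_cases hp : pieces = []
      · rw [if_pos hp]
      · rw [if_neg hp, show segments.toNat = 0 by omega, forA, ih]

-- appending one element to the scanned prefix extends its last residue class (or opens a new one)
theorem strided_append (s : Nat) (hs : 0 < s) (l : List Int) (x : Int) :
    strided s (l ++ [x]) = if s ∣ l.length then strided s l ++ [x] else strided s l := by
  induction l using strided.induct s with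
  | case1 => simp [strided]
  | case2 y t ih =>
      rw [List.cons_append, strided, strided]
      by_cases hlen : s - 1 ≤ t.length
      · rw [List.drop_append_of_le_length hlen, ih, List.length_drop]
        have hiff : s ∣ t.length - (s - 1) ↔ s ∣ (y :: t).length := by
          simp only [List.length_cons]
          constructor
          · rintro ⟨c, hc⟩
            have h1 : s * (c + 1) = s * c + s := by ring
            exact ⟨c + 1, by omega⟩
          · rintro ⟨c, hc⟩
            match c, hc with
            | 0, hc => omega
            | c + 1, hc =>
              have h1 : s * (c + 1) = s * c + s := by ring
              exact ⟨c, by omega⟩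
        by_cases hd : s ∣ t.length - (s - 1)
        · rw [if_pos hd, if_pos (hiff.mp hd)]
          simp
        · rw [if_neg hd, if_neg (fun hc => hd (hiff.mpr hc))]
      · have h1 : (t ++ [x]).drop (s - 1) = [] :=
          List.drop_eq_nil_of_le (by simp; omega)
        have h2 : t.drop (s - 1) = [] := List.drop_eq_nil_of_le (by omega)
        have hnd : ¬ s ∣ (y :: t).length := by
          intro hd
          have := Nat.le_of_dvd (by simp) hd
          simp only [List.length_cons] at this
          omega
        rw [h1, h2, if_neg hnd]

theorem modify_append_left {α : Type} (G M : List α) (i : Nat) (f : α → α) :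
    (G ++ M).modify (G.length + i) f = G ++ M.modify i f := by
  apply List.ext_getElem
  · simp
  · intro j h1 h2
    rw [List.getElem_modify]
    by_cases hj : j < G.length
    · rw [List.getElem_append_left hj, List.getElem_append_left hj, if_neg (by omega)]
    · have hj' : G.length ≤ j := by omega
      have hjM : j - G.length < M.length := by
        simp only [List.length_append, List.length_modify] at h1
        omega
      rw [List.getElem_append_right hj', List.getElem_append_right hj',
          List.getElem_modify]
      by_cases he : G.length + i = j
      · rw [if_pos he, if_pos (by omega)]
      · rw [if_neg he, if_neg (by omega)]

-- how the block groups of a scanned prefix grow element by element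
theorem blockGroups_take_succ (s : Nat) (hs : 0 < s) (ys : List Int) (r : Nat)
    (hr : r < ys.length) :
    blockGroups s (ys.take (r + 1)) =
      if r < s then blockGroups s (ys.take r) ++ [[ys[r]]]
      else (blockGroups s (ys.take r)).modify (r % s) (fun l => l ++ [ys[r]]) := by
  have htake : ys.take (r + 1) = ys.take r ++ [ys[r]] := by
    rw [List.take_succ, List.getElem?_eq_getElem hr]
    rfl
  have hlenr : (ys.take r).length = r := by simp; omega
  unfold blockGroups
  rw [htake]
  have hL : (ys.take r ++ [ys[r]]).length = r + 1 := by simp; omega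
  rw [hL, hlenr]
  by_cases hrs : r < s
  · rw [if_pos hrs]
    have h1 : min s (r + 1) = r + 1 := by omega
    have h2 : min s r = r := by omega
    rw [h1, h2, List.range_succ, List.map_append]
    congr 1
    · apply List.map_congr_left
      intro i hi
      simp only [List.mem_range] at hi
      rw [List.drop_append_of_le_length (by omega), strided_append s hs, if_neg]
      intro hd
      have hlen : ((ys.take r).drop i).length = r - i := by simp [hlenr]
      rw [hlen] at hd
      have := Nat.le_of_dvd (by omega) hd
      omega
    · simp only [List.map_cons, List.map_nil]
      rw [List.drop_append_of_le_length (by omega), List.drop_eq_nil_of_le (by omega)]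
      simp [strided]
  · rw [if_neg hrs]
    have h1 : min s (r + 1) = s := by omega
    have h2 : min s r = s := by omega
    rw [h1, h2]
    apply List.ext_getElem
    · simp
    · intro i hi1 hi2
      simp only [List.length_map, List.length_range] at hi1
      rw [List.getElem_modify, List.getElem_map, List.getElem_map]
      simp only [List.getElem_range]
      rw [List.drop_append_of_le_length (by omega), strided_append s hs]
      have hlen : ((ys.take r).drop i).length = r - i := by simp [hlenr]
      rw [hlen]
      by_cases hie : r % s = i
      · have hdm := Nat.div_add_mod r s
        rw [if_pos hie, if_pos ⟨r / s, by omega⟩]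
      · rw [if_neg hie, if_neg]
        rintro ⟨c, hc⟩
        apply hie
        have hieq : r = s * c + i := by omega
        rw [hieq, Nat.mul_add_mod, Nat.mod_eq_of_lt hi1]

-- B's scatter over one enumerated block builds exactly that block's groups
theorem block_fold (s step : Nat) (hs : 0 < s) (hstep : 0 < step) (ys : List Int)
    (hys : ys.length ≤ step) (b : Nat) :
    ∀ (r : Nat), r ≤ ys.length → ∀ (groups : List (List Int)), groups.length = b * s →
      (PySem.List.enumerate (ys.take r) ((b * step : Nat) : Int)).foldl
          (scatterStep (s : Int) ((step : Nat) : Int)) groups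
        = groups ++ blockGroups s (ys.take r) := by
  intro r
  induction r with
  | zero =>
      intro _ groups hg
      simp [PySem.List.enumerate_nil, blockGroups]
  | succ r ih =>
      intro hr groups hg
      have hrlt : r < ys.length := by omega
      have hrstep : r < step := by omega
      have htake : ys.take (r + 1) = ys.take r ++ [ys[r]] := by
        rw [List.take_succ, List.getElem?_eq_getElem hrlt]
        rfl
      have hlenr : (ys.take r).length = r := by simp; omega
      have hEnum : PySem.List.enumerate (ys.take (r + 1)) ((b * step : Nat) : Int)
          = PySem.List.enumerate (ys.take r) ((b * step : Nat) : Int)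
            ++ [(((b * step : Nat) : Int) + (r : Int), ys[r])] := by
        rw [htake, PySem.List.enumerate_append, hlenr, PySem.List.enumerate_cons,
            PySem.List.enumerate_nil]
      rw [hEnum, List.foldl_append, ih (by omega) groups hg]
      simp only [List.foldl_cons, List.foldl_nil]
      have hbg_len : (blockGroups s (ys.take r)).length = min s r := by
        simp [blockGroups, hlenr]
      have hidx : ((b * step : Nat) : Int) + (r : Int) = ((b * step + r : Nat) : Int) := by
        push_cast; ring
      have hcomm : b * step + r = step * b + r := by ring
      have hdiv : (b * step + r) / step = b := by
        rw [hcomm, Nat.mul_add_div hstep, Nat.div_eq_of_lt hrstep]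
        omega
      have hmod : (b * step + r) % step = r := by
        rw [hcomm, Nat.mul_add_mod, Nat.mod_eq_of_lt hrstep]
      have hg_eq : PySem.Int.floordiv (((b * step : Nat) : Int) + (r : Int)) ((step : Nat) : Int)
              * (s : Int)
            + PySem.Int.mod (PySem.Int.mod (((b * step : Nat) : Int) + (r : Int))
                ((step : Nat) : Int)) (s : Int)
          = ((b * s + r % s : Nat) : Int) := by
        rw [hidx, PySem.Int.floordiv_natCast, PySem.Int.mod_natCast, hdiv, hmod,
            PySem.Int.mod_natCast]
        push_cast; ring
      simp only [scatterStep, hg_eq]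
      have hlen_all : ((groups ++ blockGroups s (ys.take r)).length : Int)
          = ((b * s + min s r : Nat) : Int) := by
        simp [hg, hbg_len]
      rw [hlen_all]
      by_cases hrs : r < s
      · have hmin : min s r = r := by omega
        have hrm : r % s = r := Nat.mod_eq_of_lt hrs
        rw [if_pos (by rw [hrm, hmin]), List.append_assoc,
            blockGroups_take_succ s hs ys r hrlt, if_pos hrs]
      · have hmin : min s r = s := by omega
        have hrm : r % s < s := Nat.mod_lt _ hs
        rw [if_neg (by rw [hmin]; intro hc; have := Int.natCast_inj.mp hc; omega)]
        rw [Int.toNat_natCast]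
        have hsplit : b * s + r % s = groups.length + r % s := by omega
        rw [hsplit, modify_append_left,
            blockGroups_take_succ s hs ys r hrlt, if_neg hrs]

-- the whole scatter pass, block by block
theorem scatter_blocks (s m : Nat) (hs : 0 < s) (hm : 0 < m) :
    ∀ (N : Nat) (xs : List Int), xs.length ≤ N →
      ∀ (b : Nat) (groups : List (List Int)), groups.length = b * s →
        (PySem.List.enumerate xs ((b * (m * s) : Nat) : Int)).foldl
            (scatterStep (s : Int) ((m * s : Nat) : Int)) groups
          = groups ++ Gs s (m * s) (Nat.mul_pos hm hs) xs := by
  intro N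
  induction N with
  | zero =>
      intro xs hx b groups hg
      have hnil : xs = [] := List.length_eq_zero_iff.mp (by omega)
      rw [hnil, PySem.List.enumerate_nil, List.foldl_nil, Gs]
      simp
  | succ N ih =>
      intro xs hx b groups hg
      have hms : 0 < m * s := Nat.mul_pos hm hs
      have hsms : s ≤ m * s := Nat.le_mul_of_pos_left s hm
      by_cases hsmall : xs.length ≤ m * s
      · have hbf := block_fold s (m * s) hs hms xs hsmall b xs.length (le_refl _) groups hg
        rw [List.take_length] at hbf
        rw [hbf]
        congr 1
        rw [Gs]
        by_cases hnil : xs = []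
        · simp [hnil, blockGroups]
        · rw [dif_neg hnil, List.take_of_length_le hsmall,
              List.drop_eq_nil_of_le hsmall, Gs]
          simp
      · push_neg at hsmall
        have hlen_take : (xs.take (m * s)).length = m * s := by simp; omega
        have hEnum : PySem.List.enumerate xs ((b * (m * s) : Nat) : Int)
            = PySem.List.enumerate (xs.take (m * s)) ((b * (m * s) : Nat) : Int)
              ++ PySem.List.enumerate (xs.drop (m * s)) (((b + 1) * (m * s) : Nat) : Int) := by
          conv_lhs => rw [← List.take_append_drop (m * s) xs]
          rw [PySem.List.enumerate_append, hlen_take]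
          congr 1
          push_cast; ring_nf
        rw [hEnum, List.foldl_append]
        have hbf := block_fold s (m * s) hs hms (xs.take (m * s)) (le_of_eq hlen_take) b
          (xs.take (m * s)).length (le_refl _) groups hg
        rw [List.take_length] at hbf
        rw [hbf]
        have hg' : (groups ++ blockGroups s (xs.take (m * s))).length = (b + 1) * s := by
          have hx : (b + 1) * s = b * s + s := by ring
          simp only [List.length_append, hg, blockGroups, List.length_map,
            List.length_range, hlen_take]
          omega
        rw [ih (xs.drop (m * s)) (by simp only [List.length_drop]; omega) (b + 1) _ hg']
        rw [List.append_assoc]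
        congr 1
        have hnil : xs ≠ [] := by
          intro h; rw [h] at hsmall; simp at hsmall
        conv_rhs => rw [Gs, dif_neg hnil]

-- ===== VERDICT (by name: the statement is the Claim_ definition above) =====
theorem split_pieces_spec : Claim_equal_split_pieces := by
  intro xs segments num _ hpre
  unfold Spec_split_pieces split_pieces split_pieces_alt
  rcases hpre with h | ⟨hseg, hnum⟩ | ⟨hseg, hnum⟩
  · subst h
    by_cases hneg : segments ≤ 0
    · rw [if_pos hneg]
      simp [whileA]
    · rw [if_neg hneg]
      simp [whileA, PySem.List.enumerate_nil]
  · obtain ⟨s, rfl⟩ : ∃ s : Nat, segments = (s : Int) := ⟨segments.toNat, by omega⟩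
    obtain ⟨m, rfl⟩ : ∃ m : Nat, num = (m : Int) := ⟨num.toNat, by omega⟩
    have hs : 0 < s := by omega
    have hm : 0 < m := by omega
    rw [if_neg (by omega : ¬ (s : Int) ≤ 0)]
    have hA := whileA_eq_Gs s m hs hm (xs.length + 1) xs [] (by omega)
    have hB := scatter_blocks s m hs hm xs.length xs (le_refl _) 0 [] (by simp)
    have hstep : (m : Int) * (s : Int) = ((m * s : Nat) : Int) := by push_cast; ring
    have h0 : ((0 * (m * s) : Nat) : Int) = 0 := by simp
    rw [h0] at hB
    rw [hA, hstep, hB]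
  · rw [whileA_nonpos _ _ (by omega), if_pos (by omega)]
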